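-- pv_equiv track=rewrite | github.com/nhatsmrt/AlgorithmPractice | LeetCode/1180. Count Substrings with Only One Distinct Letter/Solution.py | count
-- ===== SOURCE A (Python) =====
-- from typing import List
--
-- def count(occs: List[int]) -> int:
--     start = 0
--     end = 0
--     ret = 0
--
--     while start < len(occs):
--         if end + 1 < len(occs) and occs[end + 1] == occs[end] + 1:
--             end += 1
--         else:
--             num_char = end - start + 1
--             ret += num_char * (num_char + 1) // 2
--             start = end + 1
--             end += 1
--
--     return ret
-- ===== SOURCE B (Python) =====
-- from typing import List
--
-- def count(occs: List[int]) -> int: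
--     ret = 0
--     run = 0
--     prev = None
--     for x in occs:
--         if prev is not None and x == prev + 1:
--             run += 1
--         else:
--             run = 1
--         ret += run
--         prev = x
--     return ret
-- ===== Notes on version B (the rewrite author's own statement) =====
-- stated objective: simpler
-- what changed: Replaces the two-index (start/end) run-boundary scan with a triangular-number closed form per run by a single for loop that threads a current run length and adds it to the accumulator at every element.
import Mathlib
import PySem

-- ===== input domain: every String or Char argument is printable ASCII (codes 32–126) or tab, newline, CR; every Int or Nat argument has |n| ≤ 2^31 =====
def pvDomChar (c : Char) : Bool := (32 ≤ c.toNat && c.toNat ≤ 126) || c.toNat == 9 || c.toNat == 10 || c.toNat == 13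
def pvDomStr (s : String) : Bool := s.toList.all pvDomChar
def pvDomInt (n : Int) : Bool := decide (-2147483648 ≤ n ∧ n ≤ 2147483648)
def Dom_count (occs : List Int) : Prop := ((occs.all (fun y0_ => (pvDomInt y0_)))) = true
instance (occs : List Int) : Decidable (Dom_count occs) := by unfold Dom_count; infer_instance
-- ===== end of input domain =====

-- B replaces A's two-index run-boundary scan (triangular-number formula per run) by a single
-- for loop threading a current run length added to the accumulator at every element (objective: simpler).

-- ===== PORT A =====
-- while loop of A, fuel-bounded (fuel only makes the recursion total; it is never exhausted
-- on the iterations A performs, since `end` grows by 1 each iteration and is bounded by len)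
def countLoopA (occs : List Int) : Nat → Int → Int → Int → Int
  | 0, _, _, ret => ret
  | fuel + 1, start, end_, ret =>
    if start < (occs.length : Int) then
      if end_ + 1 < (occs.length : Int) ∧
          PySem.List.pyGetD occs (end_ + 1) 0 = PySem.List.pyGetD occs end_ 0 + 1 then
        countLoopA occs fuel start (end_ + 1) ret
      else
        let numChar := end_ - start + 1
        countLoopA occs fuel (end_ + 1) (end_ + 1)
          (ret + PySem.Int.floordiv (numChar * (numChar + 1)) 2)
    else ret

def count (occs : List Int) : Int :=
  countLoopA occs (occs.length + 1) 0 0 0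

-- ===== PORT B =====
-- state = (prev, run, ret)
def countStepB (s : Option Int × Int × Int) (x : Int) : Option Int × Int × Int :=
  match s with
  | (prev, run, ret) =>
    let run' :=
      match prev with
      | some p => if x = p + 1 then run + 1 else 1
      | none => 1
    (some x, run', ret + run')

def count_alt (occs : List Int) : Int :=
  (occs.foldl countStepB (none, 0, 0)).2.2

-- ===== PRECONDITION & SPEC =====
def Spec_count (occs : List Int) (out : Int) : Prop := out = count_alt occs
instance (occs : List Int) (out : Int) : Decidable (Spec_count occs out) := by unfold Spec_count; infer_instance

-- ===== CLAIM (what is proved, stated in full; the proofs are below) =====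
def Claim_equal_count : Prop := ∀ (occs : List Int), Dom_count occs → Spec_count occs (count occs)

-- ===== LEMMAS AND PROOFS =====

-- triangular number L*(L+1)//2, the per-run contribution of A
def tri (r : Int) : Int := PySem.Int.floordiv (r * (r + 1)) 2

-- remaining total from a position whose element is p and whose current run has length r
def runTail : Int → Int → List Int → Int
  | _, r, [] => tri r
  | p, r, x :: xs => if x = p + 1 then runTail x (r + 1) xs else tri r + runTail x 1 xs

lemma tri_succ (r : Int) : tri (r + 1) = tri r + (r + 1) := by
  unfold tri
  rw [PySem.Int.floordiv_eq_ediv_of_pos (by norm_num), PySem.Int.floordiv_eq_ediv_of_pos (by norm_num)]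
  obtain ⟨k, hk⟩ := Int.even_mul_succ_self r
  have h1 : r * (r + 1) = 2 * k := by omega
  have h2 : (r + 1) * ((r + 1) + 1) = 2 * (k + (r + 1)) := by linear_combination h1
  rw [h1, h2, Int.mul_ediv_cancel_left _ (by norm_num), Int.mul_ediv_cancel_left _ (by norm_num)]

lemma tri_one : tri 1 = 1 := by decide

lemma foldB (xs : List Int) : ∀ (p r a : Int),
    ((xs.foldl countStepB (some p, r, a)).2.2) = a + runTail p r xs - tri r := by
  induction xs with
  | nil => intro p r a; simp [runTail]
  | cons x xs ih =>
    intro p r a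
    have hstep : countStepB (some p, r, a) x
        = (some x, (if x = p + 1 then r + 1 else 1), a + (if x = p + 1 then r + 1 else 1)) := rfl
    have hrt : runTail p r (x :: xs)
        = if x = p + 1 then runTail x (r + 1) xs else tri r + runTail x 1 xs := rfl
    rw [List.foldl_cons, hstep, hrt]
    by_cases h : x = p + 1
    · rw [if_pos h, if_pos h, ih, tri_succ]; ring
    · rw [if_neg h, if_neg h, ih, tri_one]; ring

lemma loopA_done (occs : List Int) (fuel : Nat) (s e ret : Int)
    (h : ¬ s < (occs.length : Int)) : countLoopA occs fuel s e ret = ret := by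
  cases fuel with
  | zero => rfl
  | succ n => simp [countLoopA, h]

lemma loopA_eq (occs : List Int) : ∀ (fuel sn en : Nat) (ret : Int),
    sn ≤ en → en < occs.length → occs.length ≤ en + fuel →
    countLoopA occs fuel (sn : Int) (en : Int) ret
      = ret + runTail (occs.getD en 0) ((en : Int) - (sn : Int) + 1) (occs.drop (en + 1)) := by
  intro fuel
  induction fuel with
  | zero => intro sn en ret _ h1 h2; omega
  | succ fuel ih =>
    intro sn en ret hse hen hlen
    have hstart : (sn : Int) < (occs.length : Int) := by exact_mod_cast Nat.lt_of_le_of_lt hse hen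
    have hcast1 : ((en : Int) + 1) = ((en + 1 : Nat) : Int) := by push_cast; ring
    rw [countLoopA, if_pos hstart]
    by_cases hc : (en : Int) + 1 < (occs.length : Int) ∧
        PySem.List.pyGetD occs ((en : Int) + 1) 0 = PySem.List.pyGetD occs (en : Int) 0 + 1
    · rw [if_pos hc]
      obtain ⟨hlt, heq⟩ := hc
      have hlt' : en + 1 < occs.length := by exact_mod_cast hlt
      have heq' : occs.getD (en + 1) 0 = occs.getD en 0 + 1 := by
        rw [hcast1, PySem.List.pyGetD_natCast, PySem.List.pyGetD_natCast] at heq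
        exact heq
      rw [hcast1, ih sn (en + 1) ret (by omega) hlt' (by omega)]
      have hdrop : occs.drop (en + 1) = occs.getD (en + 1) 0 :: occs.drop (en + 2) := by
        rw [List.drop_eq_getElem_cons hlt']
        simp [List.getD, List.getElem?_eq_getElem hlt']
      rw [hdrop, runTail, if_pos heq']
      have : ((en + 1 : Nat) : Int) - (sn : Int) + 1 = ((en : Int) - (sn : Int) + 1) + 1 := by
        push_cast; ring
      rw [this]
    · rw [if_neg hc]
      have htri : PySem.Int.floordiv (((en : Int) - (sn : Int) + 1) * (((en : Int) - (sn : Int) + 1) + 1)) 2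
          = tri ((en : Int) - (sn : Int) + 1) := rfl
      by_cases hend : en + 1 < occs.length
      · -- run breaks: next element exists but is not prev + 1
        have heq' : ¬ occs.getD (en + 1) 0 = occs.getD en 0 + 1 := by
          intro h
          apply hc
          constructor
          · exact_mod_cast hend
          · rw [hcast1, PySem.List.pyGetD_natCast, PySem.List.pyGetD_natCast]
            exact h
        rw [hcast1, ih (en + 1) (en + 1) _ (le_refl _) hend (by omega)]
        have hdrop : occs.drop (en + 1) = occs.getD (en + 1) 0 :: occs.drop (en + 2) := by
          rw [List.drop_eq_getElem_cons hend]
          simp [List.getD, List.getElem?_eq_getElem hend]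
        rw [hdrop, runTail, if_neg heq', htri]
        have : ((en + 1 : Nat) : Int) - ((en + 1 : Nat) : Int) + 1 = 1 := by push_cast; ring
        rw [this]
        ring
      · -- end of list: close the last run and terminate
        have hlenx : en + 1 = occs.length := by omega
        have hdone : ¬ ((en : Int) + 1) < (occs.length : Int) := by
          rw [hcast1, hlenx]; omega
        rw [loopA_done occs fuel _ _ _ hdone]
        have hdrop : occs.drop (en + 1) = [] := List.drop_eq_nil_of_le (by omega)
        rw [hdrop, runTail, htri]

-- ===== VERDICT (by name: the statement is the Claim_ definition above) =====
theorem count_spec : Claim_equal_count := by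
  intro occs _
  unfold Spec_count count count_alt
  cases occs with
  | nil => rfl
  | cons x xs =>
    have h0 : ((0 : Nat) : Int) = (0 : Int) := rfl
    have := loopA_eq (x :: xs) ((x :: xs).length + 1) 0 0 0 (le_refl 0) (by simp) (by omega)
    rw [h0] at this
    rw [this]
    simp only [List.foldl_cons, countStepB]
    rw [foldB xs x 1 (0 + 1), tri_one]
    simp
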